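-- pv_equiv track=rewrite | github.com/antonybholmes/gal | encode.py | decode_12bit
-- ===== SOURCE A (Python) =====
-- def decode_12bit(bytes, start, l):
--   p = 0
--
--   even = start % 2 == 0
--
--   ret = []
--
--   for i in range(0, l):
--     if even:
--       ret.append((bytes[p] << 4) | ((bytes[p + 1] & 0b11110000) >> 4))
--     else:
--       ret.append(((bytes[p] & 0b1111) << 8) | (bytes[p + 1] & 0b11111111))
--
--       p += 1
--
--     p += 1
--
--     even = not even
--
--   return ret
-- ===== SOURCE B (Python) =====
-- def decode_12bit(bytes, start, l):
--   # Treat the input as a stream of 4-bit nibbles with one uniformly-advancing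
--   # counter instead of the even/odd branch with a conditionally-incremented p.
--   def nib(k):
--     b = bytes[k // 2]
--     return b >> 4 if k % 2 == 0 else b & 0b1111
--
--   n = start % 2
--   ret = []
--   for _ in range(l):
--     ret.append((nib(n) << 8) | ((nib(n + 1) & 0b1111) << 4) | (nib(n + 2) & 0b1111))
--     n += 3
--   return ret
-- ===== Notes on version B (the rewrite author's own statement) =====
-- stated objective: simpler
-- what changed: B reads the data as a uniform stream of 4-bit nibbles with one counter advancing by 3 per output, replacing A's even/odd state machine with its branch-dependent pointer increments; Pre_ excludes only inputs where A (and B) raise IndexError.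
import Mathlib
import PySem

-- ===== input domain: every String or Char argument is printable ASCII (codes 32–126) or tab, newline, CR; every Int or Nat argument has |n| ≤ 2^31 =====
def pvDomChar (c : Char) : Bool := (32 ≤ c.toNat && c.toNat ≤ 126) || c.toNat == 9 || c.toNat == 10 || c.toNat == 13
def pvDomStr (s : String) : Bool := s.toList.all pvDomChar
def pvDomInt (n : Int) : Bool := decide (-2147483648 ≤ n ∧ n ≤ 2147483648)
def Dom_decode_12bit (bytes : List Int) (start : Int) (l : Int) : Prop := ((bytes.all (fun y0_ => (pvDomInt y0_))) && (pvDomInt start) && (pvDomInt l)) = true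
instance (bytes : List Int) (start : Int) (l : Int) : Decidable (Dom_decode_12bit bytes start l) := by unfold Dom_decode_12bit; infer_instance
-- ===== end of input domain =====

-- B replaces A's even/odd state machine (with its conditionally-incremented byte
-- pointer) by a uniform stream of 4-bit nibbles read at one counter advancing by 3;
-- the equivalence is about the return value (neither version mutates its arguments).

-- ===== PORT A =====
-- the for-loop of A: state = (byte pointer p, parity flag even); none = IndexError
def pvALoop (bytes : List Int) : Nat → Int → Bool → Option (List Int)
  | 0, _, _ => some []
  | Nat.succ k, p, true =>
    match PySem.List.pyGet? bytes p, PySem.List.pyGet? bytes (p + 1) with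
    | some b0, some b1 =>
      (pvALoop bytes k (p + 1) false).map
        (fun rest => (PySem.Int.bor (b0 <<< (4:Nat)) ((PySem.Int.band b1 240) >>> (4:Nat))) :: rest)
    | _, _ => none
  | Nat.succ k, p, false =>
    match PySem.List.pyGet? bytes p, PySem.List.pyGet? bytes (p + 1) with
    | some b0, some b1 =>
      (pvALoop bytes k (p + 2) true).map
        (fun rest => (PySem.Int.bor ((PySem.Int.band b0 15) <<< (8:Nat)) (PySem.Int.band b1 255)) :: rest)
    | _, _ => none

def decode_12bit (bytes : List Int) (start : Int) (l : Int) : List Int :=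
  (pvALoop bytes l.toNat 0 (PySem.Int.mod start 2 == 0)).getD []

-- ===== PORT B =====
-- nibble k of the byte stream: high half of bytes[k//2] if k even, low half otherwise
def pvNib (bytes : List Int) (k : Int) : Option Int :=
  (PySem.List.pyGet? bytes (PySem.Int.floordiv k 2)).map
    (fun (b : Int) => if PySem.Int.mod k 2 == 0 then b >>> (4:Nat) else PySem.Int.band b 15)

def pvBLoop (bytes : List Int) : Nat → Int → Option (List Int)
  | 0, _ => some []
  | Nat.succ j, n =>
    match pvNib bytes n, pvNib bytes (n + 1), pvNib bytes (n + 2) with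
    | some x0, some x1, some x2 =>
      (pvBLoop bytes j (n + 3)).map
        (fun rest =>
          (PySem.Int.bor
            (PySem.Int.bor (x0 <<< (8:Nat)) ((PySem.Int.band x1 15) <<< (4:Nat)))
            (PySem.Int.band x2 15)) :: rest)
    | _, _, _ => none

def decode_12bit_alt (bytes : List Int) (start : Int) (l : Int) : List Int :=
  (pvBLoop bytes l.toNat (PySem.Int.mod start 2)).getD []

-- ===== PRECONDITION & SPEC =====
-- Pre_ excludes exactly the inputs on which A raises IndexError (the last iteration
-- reads bytes[(3*(l-1) + start%2)//2 + 1]); B raises there too.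
def Pre_decode_12bit (bytes : List Int) (start : Int) (l : Int) : Prop :=
  l ≤ 0 ∨ PySem.Int.floordiv (3 * (l - 1) + PySem.Int.mod start 2) 2 + 1 < (bytes.length : Int)
instance (bytes : List Int) (start : Int) (l : Int) : Decidable (Pre_decode_12bit bytes start l) := by
  unfold Pre_decode_12bit; infer_instance

def pvWitness_decode_12bit : List Int × Int × Int := ([161, 35, 69], 0, 2)

def Spec_decode_12bit (bytes : List Int) (start : Int) (l : Int) (out : List Int) : Prop :=
  out = decode_12bit_alt bytes start l
instance (bytes : List Int) (start : Int) (l : Int) (out : List Int) : Decidable (Spec_decode_12bit bytes start l out) := by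
  unfold Spec_decode_12bit; infer_instance

-- ===== CLAIM (what is proved, stated in full; the proofs are below) =====
def Claim_equal_decode_12bit : Prop := ∀ (bytes : List Int) (start : Int) (l : Int), Dom_decode_12bit bytes start l → Pre_decode_12bit bytes start l → Spec_decode_12bit bytes start l (decode_12bit bytes start l)

-- ===== LEMMAS AND PROOFS =====

-- Nat-level bit facts
lemma pvNat15 (x : Nat) : x &&& 15 = x % 16 := by
  simpa using Nat.and_two_pow_sub_one_eq_mod x 4

lemma pvNat255 (x : Nat) : x &&& 255 = x % 256 := by
  simpa using Nat.and_two_pow_sub_one_eq_mod x 8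

lemma pvNat240 (x : Nat) : x &&& 240 = x / 16 % 16 * 16 := by
  have h : x / 16 % 16 * 16 = ((x >>> 4) &&& 15) <<< 4 := by
    rw [Nat.shiftRight_eq_div_pow, pvNat15, Nat.shiftLeft_eq]
  rw [h]
  apply Nat.eq_of_testBit_eq
  intro i
  rcases lt_or_ge i 8 with h8 | h8
  · interval_cases i <;>
      simp [Nat.testBit_and, Nat.testBit_shiftLeft, Nat.testBit_shiftRight,
        show Nat.testBit 240 1 = false from by decide,
        show Nat.testBit 240 2 = false from by decide,
        show Nat.testBit 240 3 = false from by decide,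
        show Nat.testBit 240 4 = true from by decide,
        show Nat.testBit 240 5 = true from by decide,
        show Nat.testBit 240 6 = true from by decide,
        show Nat.testBit 240 7 = true from by decide,
        show Nat.testBit 15 1 = true from by decide,
        show Nat.testBit 15 2 = true from by decide,
        show Nat.testBit 15 3 = true from by decide]
  · have h240 : Nat.testBit 240 i = false :=
      Nat.testBit_lt_two_pow (by calc (240:Nat) < 2 ^ 8 := by norm_num
                                   _ ≤ 2 ^ i := Nat.pow_le_pow_right (by norm_num) h8)
    have h15 : Nat.testBit 15 (i - 4) = false := by
      have h15' : (15:Nat) = 2 ^ 4 - 1 := by norm_num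
      rw [h15', Nat.testBit_two_pow_sub_one]
      simp; omega
    simp [Nat.testBit_and, Nat.testBit_shiftLeft, Nat.testBit_shiftRight, h240, h15]

lemma pvNatLow16 (N r : Nat) (h : N % 16 = 15) (hr : r < 16) : N &&& r = r := by
  have hle : N &&& r ≤ r := Nat.and_le_right
  have hsplit : (N &&& r) % 2 ^ 4 = N % 2 ^ 4 &&& r % 2 ^ 4 := Nat.and_mod_two_pow
  norm_num at hsplit
  rw [Nat.mod_eq_of_lt (lt_of_le_of_lt hle hr)] at hsplit
  rw [hsplit, h, Nat.mod_eq_of_lt hr, Nat.land_comm, pvNat15, Nat.mod_eq_of_lt hr]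

lemma pvNatLow256 (N r : Nat) (h : N % 256 = 255) (hr : r < 256) : N &&& r = r := by
  have hle : N &&& r ≤ r := Nat.and_le_right
  have hsplit : (N &&& r) % 2 ^ 8 = N % 2 ^ 8 &&& r % 2 ^ 8 := Nat.and_mod_two_pow
  norm_num at hsplit
  rw [Nat.mod_eq_of_lt (lt_of_le_of_lt hle hr)] at hsplit
  rw [hsplit, h, Nat.mod_eq_of_lt hr, Nat.land_comm, pvNat255, Nat.mod_eq_of_lt hr]

lemma pvNatOr16 (x y : Nat) (h : x % 16 = 0) (hy : y < 16) : x ||| y = x + y := by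
  have hx : x = 2 ^ 4 * (x / 16) := by omega
  have hy' : y < 2 ^ 4 := by simpa using hy
  have h2 := Nat.two_pow_add_eq_or_of_lt hy' (x / 16)
  rw [← hx] at h2
  exact h2.symm

lemma pvNatOr256 (x y : Nat) (h : x % 256 = 0) (hy : y < 256) : x ||| y = x + y := by
  have hx : x = 2 ^ 8 * (x / 256) := by omega
  have hy' : y < 2 ^ 8 := by simpa using hy
  have h2 := Nat.two_pow_add_eq_or_of_lt hy' (x / 256)
  rw [← hx] at h2
  exact h2.symm

-- Int-level bridges for Python's <<, >>, &, |
lemma pvShl4 (b : Int) : b <<< (4:Nat) = b * 16 := by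
  rw [← Int.shiftLeft_natCast_right, Int.shiftLeft_eq_mul_pow]; norm_num

lemma pvShl8 (b : Int) : b <<< (8:Nat) = b * 256 := by
  rw [← Int.shiftLeft_natCast_right, Int.shiftLeft_eq_mul_pow]; norm_num

lemma pvShr4 (b : Int) : b >>> (4:Nat) = b / 16 := by
  cases b with
  | ofNat m =>
    have h : (Int.ofNat m) >>> (4:Nat) = Int.ofNat (m >>> 4) := rfl
    rw [h, Nat.shiftRight_eq_div_pow]
    norm_num [Int.ofNat_eq_natCast]
  | negSucc m =>
    rw [Int.negSucc_shiftRight, Nat.shiftRight_eq_div_pow]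
    simp only [Int.negSucc_eq]
    push_cast
    omega

lemma pvBand15 (b : Int) : PySem.Int.band b 15 = b % 16 := by
  cases b with
  | ofNat m =>
    rw [PySem.Int.band_of_nonneg (by exact Int.natCast_nonneg m) (by norm_num)]
    rw [show (Int.ofNat m).toNat = m from rfl, show ((15:Int).toNat) = 15 from rfl, pvNat15]
    have hcast : Int.ofNat m = (m:Int) := rfl
    omega
  | negSucc m =>
    simp only [PySem.Int.band]
    rw [if_neg (not_le.mpr (Int.negSucc_lt_zero m)), if_pos (by norm_num)]
    have hm : (-(Int.negSucc m) - 1).toNat = m := by simp [Int.negSucc_eq]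
    rw [hm, show ((15:Int).toNat) = 15 from rfl, Nat.land_comm, pvNat15]
    simp only [Int.negSucc_eq]
    omega

lemma pvBand255 (b : Int) : PySem.Int.band b 255 = b % 256 := by
  cases b with
  | ofNat m =>
    rw [PySem.Int.band_of_nonneg (by exact Int.natCast_nonneg m) (by norm_num)]
    rw [show (Int.ofNat m).toNat = m from rfl, show ((255:Int).toNat) = 255 from rfl, pvNat255]
    have hcast : Int.ofNat m = (m:Int) := rfl
    omega
  | negSucc m =>
    simp only [PySem.Int.band]
    rw [if_neg (not_le.mpr (Int.negSucc_lt_zero m)), if_pos (by norm_num)]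
    have hm : (-(Int.negSucc m) - 1).toNat = m := by simp [Int.negSucc_eq]
    rw [hm, show ((255:Int).toNat) = 255 from rfl, Nat.land_comm, pvNat255]
    simp only [Int.negSucc_eq]
    omega

lemma pvBand240 (b : Int) : PySem.Int.band b 240 = b % 256 - b % 16 := by
  cases b with
  | ofNat m =>
    rw [PySem.Int.band_of_nonneg (by exact Int.natCast_nonneg m) (by norm_num)]
    rw [show (Int.ofNat m).toNat = m from rfl, show ((240:Int).toNat) = 240 from rfl, pvNat240]
    have hcast : Int.ofNat m = (m:Int) := rfl
    omega
  | negSucc m =>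
    simp only [PySem.Int.band]
    rw [if_neg (not_le.mpr (Int.negSucc_lt_zero m)), if_pos (by norm_num)]
    have hm : (-(Int.negSucc m) - 1).toNat = m := by simp [Int.negSucc_eq]
    rw [hm, show ((240:Int).toNat) = 240 from rfl, Nat.land_comm, pvNat240]
    simp only [Int.negSucc_eq]
    omega

lemma pvBor16 (a r : Int) (ha : a % 16 = 0) (h0 : 0 ≤ r) (h1 : r < 16) :
    PySem.Int.bor a r = a + r := by
  cases a with
  | ofNat m =>
    have hcast : Int.ofNat m = (m:Int) := rfl
    rw [PySem.Int.bor_of_nonneg (by exact Int.natCast_nonneg m) h0]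
    rw [show (Int.ofNat m).toNat = m from rfl]
    rw [pvNatOr16 m r.toNat (by omega) (by omega)]
    omega
  | negSucc m =>
    simp only [PySem.Int.bor]
    rw [if_neg (not_le.mpr (Int.negSucc_lt_zero m)), if_pos h0]
    have hm : (-(Int.negSucc m) - 1).toNat = m := by simp [Int.negSucc_eq]
    have hamod : m % 16 = 15 := by simp only [Int.negSucc_eq] at ha; omega
    rw [hm, pvNatLow16 m r.toNat hamod (by omega)]
    simp only [Int.negSucc_eq] at ha ⊢
    omega

lemma pvBor256 (a r : Int) (ha : a % 256 = 0) (h0 : 0 ≤ r) (h1 : r < 256) :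
    PySem.Int.bor a r = a + r := by
  cases a with
  | ofNat m =>
    have hcast : Int.ofNat m = (m:Int) := rfl
    rw [PySem.Int.bor_of_nonneg (by exact Int.natCast_nonneg m) h0]
    rw [show (Int.ofNat m).toNat = m from rfl]
    rw [pvNatOr256 m r.toNat (by omega) (by omega)]
    omega
  | negSucc m =>
    simp only [PySem.Int.bor]
    rw [if_neg (not_le.mpr (Int.negSucc_lt_zero m)), if_pos h0]
    have hm : (-(Int.negSucc m) - 1).toNat = m := by simp [Int.negSucc_eq]
    have hamod : m % 256 = 255 := by simp only [Int.negSucc_eq] at ha; omega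
    rw [hm, pvNatLow256 m r.toNat hamod (by omega)]
    simp only [Int.negSucc_eq] at ha ⊢
    omega

-- per-iteration value identities
lemma pvEvenVal (b0 b1 : Int) :
    PySem.Int.bor (b0 <<< (4:Nat)) ((PySem.Int.band b1 240) >>> (4:Nat))
      = PySem.Int.bor
          (PySem.Int.bor ((b0 >>> (4:Nat)) <<< (8:Nat))
            ((PySem.Int.band (PySem.Int.band b0 15) 15) <<< (4:Nat)))
          (PySem.Int.band (b1 >>> (4:Nat)) 15) := by
  simp only [pvBand240, pvBand15, pvShr4, pvShl4, pvShl8]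
  rw [pvBor256 (b0 / 16 * 256) (b0 % 16 % 16 * 16) (by omega) (by omega) (by omega)]
  rw [pvBor16 (b0 / 16 * 256 + b0 % 16 % 16 * 16) (b1 / 16 % 16) (by omega) (by omega) (by omega)]
  rw [pvBor16 (b0 * 16) ((b1 % 256 - b1 % 16) / 16) (by omega) (by omega) (by omega)]
  omega

lemma pvOddVal (b0 b1 : Int) :
    PySem.Int.bor ((PySem.Int.band b0 15) <<< (8:Nat)) (PySem.Int.band b1 255)
      = PySem.Int.bor
          (PySem.Int.bor ((PySem.Int.band b0 15) <<< (8:Nat))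
            ((PySem.Int.band (b1 >>> (4:Nat)) 15) <<< (4:Nat)))
          (PySem.Int.band (PySem.Int.band b1 15) 15) := by
  simp only [pvBand255, pvBand15, pvShr4, pvShl4, pvShl8]
  rw [pvBor256 (b0 % 16 * 256) (b1 / 16 % 16 * 16) (by omega) (by omega) (by omega)]
  rw [pvBor16 (b0 % 16 * 256 + b1 / 16 % 16 * 16) (b1 % 16 % 16) (by omega) (by omega) (by omega)]
  rw [pvBor256 (b0 % 16 * 256) (b1 % 256) (by omega) (by omega) (by omega)]
  omega

-- the loops compute the same stream: A's state (p, even) is (n//2, n%2==0) of B's nibble counter n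
lemma pvLoopEq (bytes : List Int) :
    ∀ (k : Nat) (n : Int), 0 ≤ n →
      pvALoop bytes k (PySem.Int.floordiv n 2) (PySem.Int.mod n 2 == 0) = pvBLoop bytes k n := by
  intro k
  induction k with
  | zero => intro n _; rfl
  | succ k ih =>
    intro n hn
    have hfd : ∀ m : Int, PySem.Int.floordiv m 2 = m / 2 :=
      fun m => PySem.Int.floordiv_eq_ediv_of_pos (by norm_num)
    have hmd : ∀ m : Int, PySem.Int.mod m 2 = m % 2 :=
      fun m => PySem.Int.mod_eq_emod_of_pos (by norm_num)
    have t0 : (((0:Int)) == (0:Int)) = true := by decide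
    have t1 : (((1:Int)) == (0:Int)) = false := by decide
    rcases PySem.Int.mod_two_eq n with he | ho
    · -- n even
      have he' : n % 2 = 0 := by rw [← hmd]; exact he
      have e1 : PySem.Int.floordiv (n + 1) 2 = PySem.Int.floordiv n 2 := by
        rw [hfd, hfd]; omega
      have e2 : PySem.Int.floordiv (n + 2) 2 = PySem.Int.floordiv n 2 + 1 := by
        rw [hfd, hfd]; omega
      have e3 : PySem.Int.floordiv (n + 3) 2 = PySem.Int.floordiv n 2 + 1 := by
        rw [hfd, hfd]; omega
      have m1 : PySem.Int.mod (n + 1) 2 = 1 := by rw [hmd]; omega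
      have m2 : PySem.Int.mod (n + 2) 2 = 0 := by rw [hmd]; omega
      have m3 : PySem.Int.mod (n + 3) 2 = 1 := by rw [hmd]; omega
      have hrec := ih (n + 3) (by omega)
      rw [e3, m3, t1] at hrec
      rw [he]
      simp only [pvALoop, pvBLoop, pvNib, he, m1, m2, e1, e2, t0, t1,
        if_true, Bool.false_eq_true, if_false]
      cases hb0 : PySem.List.pyGet? bytes (PySem.Int.floordiv n 2) with
      | none => simp
      | some b0 =>
        cases hb1 : PySem.List.pyGet? bytes (PySem.Int.floordiv n 2 + 1) with
        | none => simp
        | some b1 =>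
          simp only [Option.map_some]
          rw [← hrec]
          congr 1
          funext rest
          rw [pvEvenVal b0 b1]
    · -- n odd
      have ho' : n % 2 = 1 := by rw [← hmd]; exact ho
      have e1 : PySem.Int.floordiv (n + 1) 2 = PySem.Int.floordiv n 2 + 1 := by
        rw [hfd, hfd]; omega
      have e2 : PySem.Int.floordiv (n + 2) 2 = PySem.Int.floordiv n 2 + 1 := by
        rw [hfd, hfd]; omega
      have e3 : PySem.Int.floordiv (n + 3) 2 = PySem.Int.floordiv n 2 + 2 := by
        rw [hfd, hfd]; omega
      have m1 : PySem.Int.mod (n + 1) 2 = 0 := by rw [hmd]; omega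
      have m2 : PySem.Int.mod (n + 2) 2 = 1 := by rw [hmd]; omega
      have m3 : PySem.Int.mod (n + 3) 2 = 0 := by rw [hmd]; omega
      have hrec := ih (n + 3) (by omega)
      rw [e3, m3, t0] at hrec
      rw [ho]
      simp only [pvALoop, pvBLoop, pvNib, ho, m1, m2, e1, e2, t0, t1,
        if_true, Bool.false_eq_true, if_false]
      cases hb0 : PySem.List.pyGet? bytes (PySem.Int.floordiv n 2) with
      | none => simp
      | some b0 =>
        cases hb1 : PySem.List.pyGet? bytes (PySem.Int.floordiv n 2 + 1) with
        | none => simp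
        | some b1 =>
          simp only [Option.map_some]
          rw [← hrec]
          congr 1
          funext rest
          rw [pvOddVal b0 b1]

-- ===== VERDICT (by name: the statement is the Claim_ definition above) =====
theorem decode_12bit_spec : Claim_equal_decode_12bit := by
  intro bytes start l _dom _pre
  show decode_12bit bytes start l = decode_12bit_alt bytes start l
  unfold decode_12bit decode_12bit_alt
  have h := pvLoopEq bytes l.toNat (PySem.Int.mod start 2)
    (PySem.Int.mod_nonneg start (by norm_num))
  rcases PySem.Int.mod_two_eq start with h0 | h1
  · rw [h0] at h ⊢
    rw [show PySem.Int.floordiv (0:Int) 2 = 0 from by decide,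
        show PySem.Int.mod (0:Int) 2 = 0 from by decide] at h
    rw [← h]
  · rw [h1] at h ⊢
    rw [show PySem.Int.floordiv (1:Int) 2 = 0 from by decide,
        show PySem.Int.mod (1:Int) 2 = 1 from by decide] at h
    rw [← h]
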